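-- pv_equiv track=rewrite | github.com/lhalcomb/AICSCI461 | Extraneous/rowserverAssign.py | distribute_rows
-- ===== SOURCE A (Python) =====
-- def distribute_rows(servers, customers_per_row):
--     # Initialize servers with empty lists and zero loads
--     server_loads = [0] * servers
--     server_rows = [[] for _ in range(servers)]
--
--     # Pair rows with customer counts and sort descending
--     rows = sorted(enumerate(customers_per_row, start=1), key=lambda x: -x[1])
--
--     # Greedy balancing algorithm
--     for row, customers in rows:
--         # Find the server with the least load
--         min_server = min(range(servers), key=lambda i: server_loads[i])
--         # Assign row to that server
--         server_rows[min_server].append(row)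
--         server_loads[min_server] += customers
--
--     return server_rows, rows, server_loads
-- ===== SOURCE B (Python) =====
-- def distribute_rows(servers, customers_per_row):
--     # Pair rows with customer counts and sort descending (same output contract as A)
--     rows = sorted(enumerate(customers_per_row, start=1), key=lambda x: -x[1])
--
--     # Pool of (load, server_index), kept sorted in DESCENDING lexicographic order,
--     # so the least-loaded server (smallest index on ties) is always the LAST entry.
--     pool = [(0, i) for i in range(servers - 1, -1, -1)]
--     assign = [[] for _ in range(servers)]
--
--     for row, customers in rows:
--         load, i = pool.pop()          # least-loaded server, O(1)
--         assign[i].append(row)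
--         entry = (load + customers, i)
--         # binary search for the insertion point keeping the pool sorted descending:
--         # first position whose element is not greater than entry
--         lo, hi = 0, len(pool)
--         while lo < hi:
--             mid = (lo + hi) // 2
--             if pool[mid] > entry:
--                 lo = mid + 1
--             else:
--                 hi = mid
--         pool.insert(lo, entry)
--
--     # read the loads back in server order
--     loads = [load for load, i in sorted(pool, key=lambda t: t[1])]
--     return assign, rows, loads
-- ===== Notes on version B (the rewrite author's own statement) =====
-- stated objective: faster
-- what changed: Replaces A's per-iteration linear min-scan over all servers with a pool of (load, server) pairs kept sorted in descending lexicographic order: the least-loaded server is popped from the end in O(1) and the updated pair is re-inserted at a position found by binary search; the final load list is read back by sorting the pool by server index.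
import Mathlib
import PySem

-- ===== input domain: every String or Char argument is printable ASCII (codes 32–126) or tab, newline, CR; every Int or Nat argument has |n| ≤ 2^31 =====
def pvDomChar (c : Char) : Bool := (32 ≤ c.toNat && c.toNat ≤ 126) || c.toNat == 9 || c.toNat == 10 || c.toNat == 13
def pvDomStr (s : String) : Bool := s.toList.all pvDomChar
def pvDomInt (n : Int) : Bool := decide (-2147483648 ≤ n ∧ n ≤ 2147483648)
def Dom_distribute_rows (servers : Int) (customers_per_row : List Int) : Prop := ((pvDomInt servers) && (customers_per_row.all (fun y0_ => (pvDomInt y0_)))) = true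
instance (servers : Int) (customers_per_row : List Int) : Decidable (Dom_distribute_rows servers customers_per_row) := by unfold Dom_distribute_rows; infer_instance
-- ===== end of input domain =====

-- B replaces A's per-row linear min-scan over all servers by a descending-sorted pool of
-- (load, index) pairs with O(1) pop of the least-loaded server and binary-search re-insertion
-- (objective: faster, measured in a timing run).

-- ===== PORT A =====
-- loop body of A's 'for row, customers in rows' (indices produced by min are always in range;
-- min over an empty range would raise ValueError — excluded by Pre_)
def pvStepA (servers : Int) (st : List (List Int) × List Int) (rc : Int × Int) : List (List Int) × List Int :=
  let min_server := ((PySem.List.min? (PySem.List.pyRange 0 servers 1) (fun i => PySem.List.pyGetD st.2 i 0)).getD 0)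
  (st.1.set min_server.toNat (PySem.List.pyGetD st.1 min_server [] ++ [rc.1]),
   st.2.set min_server.toNat (PySem.List.pyGetD st.2 min_server 0 + rc.2))

def distribute_rows (servers : Int) (customers_per_row : List Int) : List (List Int) × (List (Int × Int)) × List Int :=
  let server_loads : List Int := List.replicate servers.toNat 0
  let server_rows : List (List Int) := (PySem.List.pyRange 0 servers 1).map (fun _ => ([] : List Int))
  let rows := PySem.List.sorted (PySem.List.enumerate customers_per_row 1) (fun x => -x.2)
  let st := rows.foldl (pvStepA servers) (server_rows, server_loads)
  (st.1, rows, st.2)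

-- ===== PORT B =====
-- Python tuple comparison '>' on pairs of ints
def pvTupGt (a b : Int × Int) : Bool := b.1 < a.1 || (a.1 == b.1 && b.2 < a.2)

-- the 'while lo < hi' binary-search loop of B (pool[mid] is always in range: lo ≤ mid < hi ≤ len)
def pvBisect (pool : List (Int × Int)) (entry : Int × Int) (lo hi : Nat) : Nat :=
  if _h : lo < hi then
    if pvTupGt (pool.getD ((lo + hi) / 2) (0, 0)) entry then pvBisect pool entry ((lo + hi) / 2 + 1) hi
    else pvBisect pool entry lo ((lo + hi) / 2)
  else lo
termination_by hi - lo
decreasing_by all_goals omega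

-- loop body of B's 'for row, customers in rows' (pool.pop() on an empty pool would raise
-- IndexError — excluded by Pre_)
def pvStepB (st : List (List Int) × List (Int × Int)) (rc : Int × Int) : List (List Int) × List (Int × Int) :=
  let le := st.2.getLast?.getD (0, 0)
  let pool := st.2.dropLast
  let assign := st.1.set le.2.toNat (PySem.List.pyGetD st.1 le.2 [] ++ [rc.1])
  let entry := (le.1 + rc.2, le.2)
  let lo := pvBisect pool entry 0 pool.length
  (assign, PySem.List.insert pool (lo : Int) entry)

def distribute_rows_alt (servers : Int) (customers_per_row : List Int) : List (List Int) × (List (Int × Int)) × List Int :=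
  let rows := PySem.List.sorted (PySem.List.enumerate customers_per_row 1) (fun x => -x.2)
  let pool : List (Int × Int) := (PySem.List.pyRange (servers - 1) (-1) (-1)).map (fun i => ((0 : Int), i))
  let assign : List (List Int) := (PySem.List.pyRange 0 servers 1).map (fun _ => ([] : List Int))
  let st := rows.foldl pvStepB (assign, pool)
  (st.1, rows, (PySem.List.sorted st.2 (fun t => t.2)).map (fun t => t.1))

-- ===== PRECONDITION & SPEC =====
-- A raises ValueError (min of an empty range) when servers ≤ 0 and there is at least one row;
-- those inputs are excluded (B's pool.pop() raises IndexError there too).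
def Pre_distribute_rows (servers : Int) (customers_per_row : List Int) : Prop :=
  1 ≤ servers ∨ customers_per_row = []
instance (servers : Int) (customers_per_row : List Int) : Decidable (Pre_distribute_rows servers customers_per_row) := by unfold Pre_distribute_rows; infer_instance

def pvWitness_distribute_rows : Int × List Int := (2, [3, 1, 2])

def Spec_distribute_rows (servers : Int) (customers_per_row : List Int) (out : List (List Int) × (List (Int × Int)) × List Int) : Prop := out = distribute_rows_alt servers customers_per_row
instance (servers : Int) (customers_per_row : List Int) (out : List (List Int) × (List (Int × Int)) × List Int) : Decidable (Spec_distribute_rows servers customers_per_row out) := by unfold Spec_distribute_rows; infer_instance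

-- ===== CLAIM (what is proved, stated in full; the proofs are below) =====
def Claim_equal_distribute_rows : Prop := ∀ (servers : Int) (customers_per_row : List Int), Dom_distribute_rows servers customers_per_row → Pre_distribute_rows servers customers_per_row → Spec_distribute_rows servers customers_per_row (distribute_rows servers customers_per_row)

-- ===== LEMMAS AND PROOFS =====

-- the multiset of (load, server index) pairs that A's load list carries
def pvPairs (loads : List Int) : List (Int × Int) :=
  loads.zipIdx.map (fun p => (p.1, (p.2 : Int)))

-- strict descending (Python '>' as a Prop)
def pvGtP (a b : Int × Int) : Prop := b.1 < a.1 ∨ (a.1 = b.1 ∧ b.2 < a.2)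

theorem pvTupGt_iff (a b : Int × Int) : pvTupGt a b = true ↔ pvGtP a b := by
  simp [pvTupGt, pvGtP]

theorem pvGtP_trans {a b c : Int × Int} (h1 : pvGtP a b) (h2 : pvGtP b c) : pvGtP a c := by
  unfold pvGtP at *; omega

theorem pvPairs_length (l : List Int) : (pvPairs l).length = l.length := by
  simp [pvPairs]

theorem pvPairs_getElem (l : List Int) (k : Nat) (h : k < l.length) :
    (pvPairs l)[k]'(by simpa [pvPairs_length]) = (l[k], (k : Int)) := by
  simp [pvPairs]

theorem pvPairs_pairwise_idx (l : List Int) :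
    (pvPairs l).Pairwise (fun a b => a.2 < b.2) := by
  rw [List.pairwise_iff_getElem]
  intro i j hi hj hij
  rw [pvPairs_getElem l i (by simpa [pvPairs_length] using hi),
      pvPairs_getElem l j (by simpa [pvPairs_length] using hj)]
  simp; exact_mod_cast hij

theorem pvPairs_set (l : List Int) (k : Nat) (v : Int) :
    pvPairs (l.set k v) = (pvPairs l).set k (v, (k : Int)) := by
  apply List.ext_getElem
  · simp [pvPairs_length]
  · intro i hi hi'
    simp [pvPairs, List.getElem_set]
    split <;> simp_all

def pvMinStep (key : Int → Int) (acc : Option Int) (x : Int) : Option Int :=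
  match acc with
  | none => some x
  | some m => if key x < key m then some x else some m

theorem pv_min?_foldl (xs : List Int) (key : Int → Int) :
    PySem.List.min? xs key = xs.foldl (pvMinStep key) none := by
  unfold PySem.List.min?
  congr 1
  funext acc x
  cases acc <;> rfl

theorem pv_min_keep (key : Int → Int) (xs : List Int) (m : Int)
    (h : ∀ y ∈ xs, ¬ key y < key m) :
    xs.foldl (pvMinStep key) (some m) = some m := by
  induction xs with
  | nil => rfl
  | cons x t ih =>
    simp only [List.foldl_cons, pvMinStep]
    rw [if_neg (h x (by simp))]
    exact ih (fun y hy => h y (by simp [hy]))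

theorem pv_min_acc (key : Int → Int) (xs : List Int) :
    ∀ (m i0 : Int), xs.Pairwise (· < ·) → i0 ∈ xs → key i0 < key m →
    (∀ y ∈ xs, y ≠ i0 → key i0 < key y ∨ (key i0 = key y ∧ i0 < y)) →
    xs.foldl (pvMinStep key) (some m) = some i0 := by
  induction xs with
  | nil => intro m i0 _ h; simp at h
  | cons x t ih =>
    intro m i0 hp hm hlt hcond
    simp only [List.foldl_cons, pvMinStep]
    rcases List.mem_cons.1 hm with rfl | hmem
    · rw [if_pos hlt]
      apply pv_min_keep
      intro y hy
      have hlt2 := (List.pairwise_cons.1 hp).1 y hy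
      rcases hcond y (by simp [hy]) (by omega) with h | ⟨h, _⟩ <;> omega
    · have hxi : x < i0 := (List.pairwise_cons.1 hp).1 i0 hmem
      have hkey : key i0 < key x := by
        rcases hcond x (by simp) (by omega) with h | ⟨_, h⟩ <;> omega
      by_cases hc : key x < key m
      · rw [if_pos hc]
        exact ih x i0 (List.pairwise_cons.1 hp).2 hmem hkey
          (fun y hy hne => hcond y (by simp [hy]) hne)
      · rw [if_neg hc]
        exact ih m i0 (List.pairwise_cons.1 hp).2 hmem hlt
          (fun y hy hne => hcond y (by simp [hy]) hne)

-- min? over a strictly increasing list returns the unique (key, element)-lex minimum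
theorem pv_min?_eq (xs : List Int) (key : Int → Int) (i0 : Int)
    (hp : xs.Pairwise (· < ·)) (hm : i0 ∈ xs)
    (h : ∀ y ∈ xs, y ≠ i0 → key i0 < key y ∨ (key i0 = key y ∧ i0 < y)) :
    PySem.List.min? xs key = some i0 := by
  rw [pv_min?_foldl]
  cases xs with
  | nil => simp at hm
  | cons x t =>
    simp only [List.foldl_cons, pvMinStep]
    rcases List.mem_cons.1 hm with rfl | hmem
    · exact pv_min_keep key t i0 (fun y hy => by
        have hlt2 := (List.pairwise_cons.1 hp).1 y hy
        rcases h y (by simp [hy]) (by omega) with h' | ⟨h', _⟩ <;> omega)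
    · have hxi : x < i0 := (List.pairwise_cons.1 hp).1 i0 hmem
      have hkey : key i0 < key x := by
        rcases h x (by simp) (by omega) with h' | ⟨_, h'⟩ <;> omega
      exact pv_min_acc key t x i0 (List.pairwise_cons.1 hp).2 hmem hkey
        (fun y hy hne => h y (by simp [hy]) hne)

-- binary search specification on a descending-sorted pool
theorem pvBisect_spec (pool : List (Int × Int)) (e : Int × Int) (hs : pool.Pairwise pvGtP) :
    ∀ lo hi, lo ≤ hi → hi ≤ pool.length →
    (∀ k, k < lo → ∀ (h : k < pool.length), pvGtP pool[k] e) →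
    (∀ k, hi ≤ k → ∀ (h : k < pool.length), ¬ pvGtP pool[k] e) →
    pvBisect pool e lo hi ≤ pool.length ∧
    (∀ k, k < pvBisect pool e lo hi → ∀ (h : k < pool.length), pvGtP pool[k] e) ∧
    (∀ k, pvBisect pool e lo hi ≤ k → ∀ (h : k < pool.length), ¬ pvGtP pool[k] e) := by
  have hpg := List.pairwise_iff_getElem.1 hs
  intro lo hi
  induction hd : hi - lo using Nat.strong_induction_on generalizing lo hi with
  | _ n ih =>
  intro hlh hhl hbelow habove
  rw [pvBisect]
  by_cases h : lo < hi
  · rw [dif_pos h]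
    have hmid1 : (lo + hi) / 2 < hi := by omega
    have hmid2 : lo ≤ (lo + hi) / 2 := by omega
    have hmlen : (lo + hi) / 2 < pool.length := by omega
    rw [List.getD_eq_getElem _ _ hmlen]
    by_cases hgt : pvGtP pool[(lo + hi) / 2] e
    · rw [if_pos ((pvTupGt_iff _ _).2 hgt)]
      exact ih (hi - ((lo + hi) / 2 + 1)) (by omega) _ _ rfl (by omega) hhl
        (fun k hk hlen => by
          rcases Nat.lt_or_ge k lo with h' | h'
          · exact hbelow k h' hlen
          · rcases Nat.lt_or_ge k ((lo + hi) / 2) with h'' | h''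
            · exact pvGtP_trans (hpg k ((lo + hi) / 2) hlen hmlen h'') hgt
            · have : k = (lo + hi) / 2 := by omega
              subst this; exact hgt)
        habove
    · rw [if_neg (by rw [pvTupGt_iff]; exact hgt)]
      exact ih ((lo + hi) / 2 - lo) (by omega) _ _ rfl (by omega) (by omega) hbelow
        (fun k hk hlen => by
          rcases Nat.eq_or_lt_of_le hk with h' | h'
          · subst h'; exact hgt
          · intro hcon
            exact hgt (pvGtP_trans (hpg _ k hmlen hlen h') hcon))
  · rw [dif_neg h]
    have : lo = hi := by omega
    exact ⟨by omega, fun k hk hlen => hbelow k hk hlen,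
      fun k hk hlen => habove k (by omega) hlen⟩

-- inserting e at position r keeps the pool strictly descending
theorem pv_insert_pairwise (l : List (Int × Int)) (e : Int × Int) (r : Nat)
    (hr : r ≤ l.length) (hs : l.Pairwise pvGtP)
    (h1 : ∀ k, k < r → ∀ (h : k < l.length), pvGtP l[k] e)
    (h2 : ∀ k, r ≤ k → ∀ (h : k < l.length), pvGtP e l[k]) :
    (l.take r ++ e :: l.drop r).Pairwise pvGtP := by
  have hpg := List.pairwise_iff_getElem.1 hs
  rw [List.pairwise_append]
  refine ⟨hs.sublist (List.take_sublist r l), ?_, ?_⟩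
  · rw [List.pairwise_cons]
    refine ⟨?_, hs.sublist (List.drop_sublist r l)⟩
    intro b hb
    obtain ⟨j, hj, rfl⟩ := List.mem_iff_getElem.1 hb
    rw [List.getElem_drop]
    exact h2 (r + j) (by omega) (by simp at hj; omega)
  · intro a ha b hb
    obtain ⟨i, hi, rfl⟩ := List.mem_iff_getElem.1 ha
    have hi' : i < r := by simp at hi; omega
    have hil : i < l.length := by simp at hi; omega
    rw [List.getElem_take]
    rcases List.mem_cons.1 hb with rfl | hb'
    · exact h1 i hi' hil
    · obtain ⟨j, hj, rfl⟩ := List.mem_iff_getElem.1 hb'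
      rw [List.getElem_drop]
      exact hpg i (r + j) hil (by simp at hj; omega) (by omega)

-- one loop iteration: A and B assign the same row to the same server and stay in simulation
theorem pv_step_sim (servers : Int) (hs1 : 1 ≤ servers)
    (assign : List (List Int)) (loads : List Int) (pool : List (Int × Int))
    (hl : loads.length = servers.toNat)
    (hperm : pool.Perm (pvPairs loads)) (hsort : pool.Pairwise pvGtP) (rc : Int × Int) :
    (pvStepA servers (assign, loads) rc).1 = (pvStepB (assign, pool) rc).1 ∧
    (pvStepA servers (assign, loads) rc).2.length = servers.toNat ∧
    (pvStepB (assign, pool) rc).2.Perm (pvPairs (pvStepA servers (assign, loads) rc).2) ∧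
    (pvStepB (assign, pool) rc).2.Pairwise pvGtP := by
  have hlenp : pool.length = loads.length := by
    simpa [pvPairs_length] using hperm.length_eq
  have hpos : 0 < loads.length := by omega
  have hne : pool ≠ [] := by
    intro h; rw [h] at hlenp; simp at hlenp; omega
  have hqmem : (pool.getLast hne) ∈ pvPairs loads := hperm.mem_iff.1 (List.getLast_mem hne)
  obtain ⟨k, hk, hkq⟩ := List.mem_iff_getElem.1 hqmem
  have hk' : k < loads.length := by simpa [pvPairs_length] using hk
  have hq_eq : pool.getLast hne = (loads[k], (k : Int)) := by
    rw [← hkq]; exact (pvPairs_getElem loads k hk').symm ▸ rfl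
  have hsplit : pool.dropLast ++ [pool.getLast hne] = pool := List.dropLast_append_getLast hne
  have hs' : (pool.dropLast ++ [pool.getLast hne]).Pairwise pvGtP := by rw [hsplit]; exact hsort
  obtain ⟨hdl, -, hcross⟩ := List.pairwise_append.1 hs'
  have hmin : ∀ p ∈ pvPairs loads, p = pool.getLast hne ∨ pvGtP p (pool.getLast hne) := by
    intro p hp
    have hp' : p ∈ pool := hperm.mem_iff.2 hp
    rw [← hsplit] at hp'
    rcases List.mem_append.1 hp' with h | h
    · exact Or.inr (hcross p h _ (by simp))
    · simp at h; exact Or.inl h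
  have hkey_i0 : PySem.List.pyGetD loads (k : Int) 0 = loads[k] := by
    rw [PySem.List.pyGetD_eq_getElem loads 0 (by omega) (by exact_mod_cast hk')]
    simp
  have hmin? : PySem.List.min? (PySem.List.pyRange 0 servers 1)
      (fun i => PySem.List.pyGetD loads i 0) = some (k : Int) := by
    apply pv_min?_eq
    · exact PySem.List.pairwise_lt_pyRange_one 0 servers
    · rw [PySem.List.mem_pyRange_one]
      omega
    · intro y hy hne'
      rw [PySem.List.mem_pyRange_one] at hy
      have hyl : y.toNat < loads.length := by omega
      have hymem : (loads[y.toNat], y) ∈ pvPairs loads := by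
        rw [List.mem_iff_getElem]
        refine ⟨y.toNat, by simpa [pvPairs_length], ?_⟩
        rw [pvPairs_getElem loads y.toNat hyl]
        congr 1
        omega
      have hpq : pvGtP (loads[y.toNat], y) (pool.getLast hne) := by
        rcases hmin _ hymem with h | h
        · exfalso
          apply hne'
          rw [hq_eq] at h
          have := congrArg Prod.snd h
          simpa using this
        · exact h
      rw [hq_eq] at hpq
      simp only [pvGtP] at hpq
      have hkeyy : PySem.List.pyGetD loads y 0 = loads[y.toNat] :=
        PySem.List.pyGetD_eq_getElem loads 0 (by omega) (by omega)
      simp only [hkey_i0, hkeyy]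
      omega
  have hlast? : pool.getLast?.getD (0, 0) = pool.getLast hne := by
    rw [List.getLast?_eq_some_getLast hne]; rfl
  -- the new entry and its bisect position
  have hbis := pvBisect_spec pool.dropLast (loads[k] + rc.2, (k : Int)) hdl 0 pool.dropLast.length
      (Nat.zero_le _) (le_refl _)
      (fun j hj h => absurd hj (by omega))
      (fun j hj h => absurd h (by omega))
  obtain ⟨hr, hB1, hB2⟩ := hbis
  -- indices in the pool are distinct
  have hnd0 : ((pvPairs loads).map Prod.snd).Nodup := by
    have h1 : ((pvPairs loads).map Prod.snd).Pairwise (· < ·) :=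
      List.pairwise_map.2 (pvPairs_pairwise_idx loads)
    exact h1.imp (fun h => ne_of_lt h)
  have hndp : (pool.map Prod.snd).Nodup := ((hperm.map Prod.snd).nodup_iff).2 hnd0
  have hqnot : (k : Int) ∉ pool.dropLast.map Prod.snd := by
    intro hmem
    have hndp' : (pool.dropLast.map Prod.snd ++ [(pool.getLast hne).2]).Nodup := by
      have : pool.dropLast.map Prod.snd ++ [(pool.getLast hne).2] =
          (pool.dropLast ++ [pool.getLast hne]).map Prod.snd := by simp
      rw [this, hsplit]; exact hndp
    obtain ⟨-, -, hdisj⟩ := List.nodup_append.1 hndp'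
    have hne2 := hdisj _ hmem ((pool.getLast hne).2) (by simp)
    exact hne2 (by rw [hq_eq])
  have hB2' : ∀ j, pvBisect pool.dropLast (loads[k] + rc.2, (k : Int)) 0 pool.dropLast.length ≤ j →
      ∀ (h : j < pool.dropLast.length), pvGtP (loads[k] + rc.2, (k : Int)) pool.dropLast[j] := by
    intro j hj h
    have h1 := hB2 j hj h
    have h2 : pool.dropLast[j].2 ≠ (k : Int) := by
      intro he
      exact hqnot (he ▸ List.mem_map_of_mem (List.getElem_mem h))
    simp only [pvGtP] at h1 ⊢
    omega
  -- unfold the two step functions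
  simp only [pvStepA, pvStepB, hmin?, hlast?, hq_eq, Option.getD_some]
  refine ⟨by trivial, by simp [hl], ?_, ?_⟩
  · -- permutation
    rw [PySem.List.insert_natCast _ _ _ hr]
    have hkP : k < (pvPairs loads).length := by simpa [pvPairs_length]
    have e1 : pvPairs loads = (pvPairs loads).take k ++
        (pool.getLast hne) :: (pvPairs loads).drop (k + 1) := by
      conv_lhs => rw [← List.take_append_drop k (pvPairs loads)]
      congr 1
      rw [← List.getElem_cons_drop hkP, hkq]
    have hTD : pool.dropLast.Perm ((pvPairs loads).take k ++ (pvPairs loads).drop (k + 1)) := by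
      have h2 : ((pool.getLast hne) :: pool.dropLast).Perm
          ((pool.getLast hne) :: ((pvPairs loads).take k ++ (pvPairs loads).drop (k + 1))) := by
        refine ((List.perm_append_singleton _ _).symm).trans ?_
        rw [hsplit]
        refine hperm.trans ?_
        nth_rewrite 1 [e1]
        exact List.perm_middle
      exact h2.cons_inv
    simp only [Int.toNat_natCast, hkey_i0]
    rw [pvPairs_set]
    have eset : (pvPairs loads).set k (loads[k] + rc.2, (k : Int)) =
        (pvPairs loads).take k ++ (loads[k] + rc.2, (k : Int)) :: (pvPairs loads).drop (k + 1) :=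
      List.set_eq_take_cons_drop _ hkP
    rw [eset]
    have hchain : (pool.dropLast.take
          (pvBisect pool.dropLast (loads[k] + rc.2, (k : Int)) 0 pool.dropLast.length) ++
        (loads[k] + rc.2, (k : Int)) :: pool.dropLast.drop
          (pvBisect pool.dropLast (loads[k] + rc.2, (k : Int)) 0 pool.dropLast.length)).Perm
        ((loads[k] + rc.2, (k : Int)) :: pool.dropLast) := by
      have hm := List.perm_middle (a := (loads[k] + rc.2, (k : Int)))
        (l₁ := pool.dropLast.take
          (pvBisect pool.dropLast (loads[k] + rc.2, (k : Int)) 0 pool.dropLast.length))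
        (l₂ := pool.dropLast.drop
          (pvBisect pool.dropLast (loads[k] + rc.2, (k : Int)) 0 pool.dropLast.length))
      rwa [List.take_append_drop] at hm
    exact hchain.trans ((hTD.cons _).trans List.perm_middle.symm)
  · -- sortedness
    rw [PySem.List.insert_natCast _ _ _ hr]
    exact pv_insert_pairwise _ _ _ hr hdl hB1 hB2'

theorem pv_loop_sim (servers : Int) (hs1 : 1 ≤ servers) (rows : List (Int × Int)) :
    ∀ (assign : List (List Int)) (loads : List Int) (pool : List (Int × Int)),
    loads.length = servers.toNat → pool.Perm (pvPairs loads) → pool.Pairwise pvGtP →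
    (rows.foldl (pvStepA servers) (assign, loads)).1 = (rows.foldl pvStepB (assign, pool)).1 ∧
    (rows.foldl (pvStepA servers) (assign, loads)).2.length = servers.toNat ∧
    (rows.foldl pvStepB (assign, pool)).2.Perm (pvPairs (rows.foldl (pvStepA servers) (assign, loads)).2) ∧
    (rows.foldl pvStepB (assign, pool)).2.Pairwise pvGtP := by
  induction rows with
  | nil =>
    intro assign loads pool hl hperm hsort
    exact ⟨rfl, hl, hperm, hsort⟩
  | cons rc rest ih =>
    intro assign loads pool hl hperm hsort
    obtain ⟨hfst, hlen, hperm', hsort'⟩ := pv_step_sim servers hs1 assign loads pool hl hperm hsort rc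
    simp only [List.foldl_cons]
    have hA : pvStepA servers (assign, loads) rc =
        ((pvStepA servers (assign, loads) rc).1, (pvStepA servers (assign, loads) rc).2) := rfl
    have hB : pvStepB (assign, pool) rc =
        ((pvStepA servers (assign, loads) rc).1, (pvStepB (assign, pool) rc).2) := by
      rw [hfst]
    rw [hA, hB]
    exact ih _ _ _ hlen hperm' hsort'

-- the initial pool is the initial load list's pairs, descending
theorem pv_init (servers : Int) :
    ((PySem.List.pyRange (servers - 1) (-1) (-1)).map (fun i => ((0 : Int), i))).Perm
      (pvPairs (List.replicate servers.toNat 0)) ∧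
    ((PySem.List.pyRange (servers - 1) (-1) (-1)).map (fun i => ((0 : Int), i))).Pairwise pvGtP := by
  have e0 : PySem.List.pyRange (servers - 1) (-1) (-1) = (PySem.List.pyRange 0 servers 1).reverse := by
    rw [PySem.List.pyRange_neg_one_eq_reverse]
    norm_num
  have e1 : (PySem.List.pyRange 0 servers 1).map (fun i => ((0 : Int), i)) =
      pvPairs (List.replicate servers.toNat 0) := by
    apply List.ext_getElem
    · simp [pvPairs_length, PySem.List.length_pyRange_one]
    · intro i h1 h2
      have hi : i < servers.toNat := by
        simpa [PySem.List.length_pyRange_one] using h1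
      rw [List.getElem_map, PySem.List.getElem_pyRange_one,
        pvPairs_getElem _ i (by simpa using hi)]
      simp
  rw [e0, List.map_reverse, e1]
  constructor
  · exact (pvPairs (List.replicate servers.toNat 0)).reverse_perm
  · rw [List.pairwise_reverse, ← e1, List.pairwise_map]
    apply (PySem.List.pairwise_lt_pyRange_one 0 servers).imp
    intro a b hab
    exact Or.inr ⟨rfl, hab⟩

-- reading the loads back: sorting the final pool by server index recovers A's load list
theorem pv_final (loads : List Int) (pool : List (Int × Int)) (hperm : pool.Perm (pvPairs loads)) :
    (PySem.List.sorted pool (fun t => t.2)).map (fun t => t.1) = loads := by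
  rw [PySem.List.sorted_eq_of_perm_of_pairwise_lt pool (pvPairs loads) (fun t => t.2)
    hperm.symm (pvPairs_pairwise_idx loads)]
  have hcomp : ((fun (t : Int × Int) => t.1) ∘ fun (p : Int × Nat) => (p.1, (p.2 : Int))) =
      Prod.fst := rfl
  simp only [pvPairs, List.map_map, hcomp]
  exact List.zipIdx_map_fst 0 loads

-- ===== VERDICT (by name: the statement is the Claim_ definition above) =====
theorem distribute_rows_spec : Claim_equal_distribute_rows := by
  unfold Claim_equal_distribute_rows
  intro servers customers _hdom hpre
  unfold Spec_distribute_rows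
  by_cases hs1 : 1 ≤ servers
  · simp only [distribute_rows, distribute_rows_alt]
    have hinit := pv_init servers
    obtain ⟨hfst, hlen, hperm, hsort⟩ := pv_loop_sim servers hs1
      (PySem.List.sorted (PySem.List.enumerate customers 1) (fun x => -x.2))
      ((PySem.List.pyRange 0 servers 1).map (fun _ => ([] : List Int)))
      (List.replicate servers.toNat 0)
      ((PySem.List.pyRange (servers - 1) (-1) (-1)).map (fun i => ((0 : Int), i)))
      (by simp) hinit.1 hinit.2
    refine Prod.ext hfst (Prod.ext rfl ?_)
    exact (pv_final _ _ hperm).symm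
  · have hemp : customers = [] := hpre.resolve_left hs1
    subst hemp
    have ht : servers.toNat = 0 := by omega
    have hp0 : PySem.List.pyRange (servers - 1) (-1) (-1) = [] := by
      rw [PySem.List.pyRange_neg_one_eq_nil]
      omega
    simp [distribute_rows, distribute_rows_alt, ht, hp0, PySem.List.enumerate, PySem.List.sorted]
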